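-- pv_equiv track=rewrite | github.com/punit1982/prosper-app | core/currency_normalizer.py | detect_currency_from_ticker
-- ===== SOURCE A (Python) =====
-- TICKER_CURRENCY_MAP = {
--     ".NS":  "INR",   # NSE India (National Stock Exchange)
--     ".BO":  "INR",   # BSE India (Bombay Stock Exchange)
--     ".AE":  "AED",   # Dubai Financial Market (DFM)
--     ".AD":  "AED",   # Abu Dhabi Securities Exchange (ADX)
--     ".DU":  "AED",   # Dubai (alternative suffix)
--     ".HK":  "HKD",   # Hong Kong Stock Exchange
--     ".SI":  "SGD",   # Singapore Exchange
--     ".L":   "GBP",   # London Stock Exchange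
--     ".PA":  "EUR",   # Euronext Paris
--     ".AS":  "EUR",   # Euronext Amsterdam
--     ".DE":  "EUR",   # XETRA Germany
--     ".MC":  "EUR",   # Madrid Stock Exchange
--     ".MI":  "EUR",   # Milan Stock Exchange
--     ".AX":  "AUD",   # Australian Securities Exchange
--     ".TO":  "CAD",   # Toronto Stock Exchange
--     ".SS":  "CNY",   # Shanghai Stock Exchange
--     ".SZ":  "CNY",   # Shenzhen Stock Exchange
--     ".T":   "JPY",   # Tokyo Stock Exchange
--     ".KS":  "KRW",   # Korea Stock Exchange
--     ".TW":  "TWD",   # Taiwan Stock Exchange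
--     ".SA":  "BRL",   # B3 Brazil
--     ".JO":  "ZAR",   # Johannesburg Stock Exchange
--     ".SW":  "CHF",   # SIX Swiss Exchange
--     ".TA":  "ILS",   # Tel Aviv Stock Exchange
-- }
--
-- def detect_currency_from_ticker(ticker: str) -> str:
--     """
--     Detect the trading currency from a ticker symbol's exchange suffix.
--     Falls back to USD for US-listed stocks (no suffix).
--
--     Examples:
--       "AAPL"        → "USD"
--       "RELIANCE.NS" → "INR"
--       "EMAAR.AE"    → "AED"
--       "0700.HK"     → "HKD"
--     """
--     if not ticker:
--         return "USD"
--     ticker_upper = ticker.strip().upper()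
--     for suffix, currency in TICKER_CURRENCY_MAP.items():
--         if ticker_upper.endswith(suffix.upper()):
--             return currency
--     return "USD"
-- ===== SOURCE B (Python) =====
-- CURRENCY_SUFFIXES = {
--     "INR": ("NS", "BO"),
--     "AED": ("AE", "AD", "DU"),
--     "HKD": ("HK",),
--     "SGD": ("SI",),
--     "GBP": ("L",),
--     "EUR": ("PA", "AS", "DE", "MC", "MI"),
--     "AUD": ("AX",),
--     "CAD": ("TO",),
--     "CNY": ("SS", "SZ"),
--     "JPY": ("T",),
--     "KRW": ("KS",),
--     "TWD": ("TW",),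
--     "BRL": ("SA",),
--     "ZAR": ("JO",),
--     "CHF": ("SW",),
--     "ILS": ("TA",),
-- }
--
--
-- def detect_currency_from_ticker(ticker: str) -> str:
--     if not ticker:
--         return "USD"
--     t = ticker.strip().upper()
--     _head, sep, tail = t.rpartition(".")
--     if not sep:
--         return "USD"
--     for currency, suffixes in CURRENCY_SUFFIXES.items():
--         if tail in suffixes:
--             return currency
--     return "USD"
-- ===== Notes on version B (the rewrite author's own statement) =====
-- stated objective: alternative
-- what changed: Instead of testing endswith against all 24 dotted map keys, B extracts the text after the last dot with str.rpartition and matches that exact suffix against an inverted currency-to-suffixes table (16 groups), returning USD when no dot or no match.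
import Mathlib
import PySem

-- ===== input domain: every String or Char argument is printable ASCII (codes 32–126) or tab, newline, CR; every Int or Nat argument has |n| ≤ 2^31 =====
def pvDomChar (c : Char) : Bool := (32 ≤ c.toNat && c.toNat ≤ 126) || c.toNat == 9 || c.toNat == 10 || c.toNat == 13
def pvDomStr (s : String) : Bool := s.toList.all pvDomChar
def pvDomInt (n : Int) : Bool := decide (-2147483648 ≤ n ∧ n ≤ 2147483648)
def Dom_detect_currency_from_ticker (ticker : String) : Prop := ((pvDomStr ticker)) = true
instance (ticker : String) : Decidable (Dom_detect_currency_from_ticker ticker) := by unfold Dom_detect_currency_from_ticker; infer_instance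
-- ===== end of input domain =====

-- B replaces A's endswith-scan over 24 dotted map keys by extracting the text after the last
-- '.' (str.rpartition) and matching that exact suffix against an inverted currency→suffixes
-- table of 16 groups (alternative decomposition; no speed claim).

-- ===== PORT A =====

-- TICKER_CURRENCY_MAP, in insertion order (dict[str, str] → association list)
def tickerCurrencyMap : List (String × String) :=
  [(".NS", "INR"), (".BO", "INR"), (".AE", "AED"), (".AD", "AED"), (".DU", "AED"),
   (".HK", "HKD"), (".SI", "SGD"), (".L", "GBP"), (".PA", "EUR"), (".AS", "EUR"),
   (".DE", "EUR"), (".MC", "EUR"), (".MI", "EUR"), (".AX", "AUD"), (".TO", "CAD"),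
   (".SS", "CNY"), (".SZ", "CNY"), (".T", "JPY"), (".KS", "KRW"), (".TW", "TWD"),
   (".SA", "BRL"), (".JO", "ZAR"), (".SW", "CHF"), (".TA", "ILS")]

-- the 'for suffix, currency in TICKER_CURRENCY_MAP.items(): if ticker_upper.endswith(suffix.upper()): return currency' loop
def tickerScan (tu : List Char) : List (String × String) → String
  | [] => "USD"
  | (suffix, currency) :: rest =>
      if PySem.Chars.endswith tu (PySem.Chars.upper suffix.toList) then currency
      else tickerScan tu rest

def detect_currency_from_ticker (ticker : String) : String :=
  if ticker = "" then "USD"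
  else
    let ticker_upper := PySem.Chars.upper (PySem.Chars.strip ticker.toList)
    tickerScan ticker_upper tickerCurrencyMap

-- ===== PORT B =====

-- Source B's CURRENCY_SUFFIXES: currency → its exchange suffixes (dict → association list)
def currencySuffixes : List (String × List String) :=
  [("INR", ["NS", "BO"]),
   ("AED", ["AE", "AD", "DU"]),
   ("HKD", ["HK"]),
   ("SGD", ["SI"]),
   ("GBP", ["L"]),
   ("EUR", ["PA", "AS", "DE", "MC", "MI"]),
   ("AUD", ["AX"]),
   ("CAD", ["TO"]),
   ("CNY", ["SS", "SZ"]),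
   ("JPY", ["T"]),
   ("KRW", ["KS"]),
   ("TWD", ["TW"]),
   ("BRL", ["SA"]),
   ("ZAR", ["JO"]),
   ("CHF", ["SW"]),
   ("ILS", ["TA"])]

-- hand port of t.rpartition("."), restricted to the two components B uses: 'some tail'
-- when '.' occurs (tail = text after the LAST '.'), 'none' when sep == "" (no '.' in t).
-- Exact for a single-character separator: the rightmost occurrence wins.
def rpartitionDot : List Char → Option (List Char)
  | [] => none
  | c :: rest =>
      match rpartitionDot rest with
      | some tail => some tail
      | none => if c = '.' then some rest else none

-- the 'for currency, suffixes in CURRENCY_SUFFIXES.items(): if tail in suffixes: return currency' loop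
def currencyScan (tail : String) : List (String × List String) → String
  | [] => "USD"
  | (currency, suffixes) :: rest =>
      if tail ∈ suffixes then currency else currencyScan tail rest

def detect_currency_from_ticker_alt (ticker : String) : String :=
  if ticker = "" then "USD"
  else
    let t := PySem.Chars.upper (PySem.Chars.strip ticker.toList)
    match rpartitionDot t with
    | none => "USD"
    | some tail => currencyScan (String.ofList tail) currencySuffixes

-- ===== PRECONDITION & SPEC =====
def Spec_detect_currency_from_ticker (ticker : String) (out : String) : Prop := out = detect_currency_from_ticker_alt ticker
instance (ticker : String) (out : String) : Decidable (Spec_detect_currency_from_ticker ticker out) := by unfold Spec_detect_currency_from_ticker; infer_instance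

-- ===== CLAIM (what is proved, stated in full; the proofs are below) =====
def Claim_equal_detect_currency_from_ticker : Prop := ∀ (ticker : String), Dom_detect_currency_from_ticker ticker → Spec_detect_currency_from_ticker ticker (detect_currency_from_ticker ticker)

-- ===== LEMMAS AND PROOFS =====

lemma rpartitionDot_eq_none_iff (t : List Char) : rpartitionDot t = none ↔ '.' ∉ t := by
  induction t with
  | nil => simp [rpartitionDot]
  | cons c rest ih =>
    cases h : rpartitionDot rest with
    | some tail =>
      have hmem : '.' ∈ rest := by
        by_contra hn
        have := ih.mpr hn
        simp [h] at this
      simp [rpartitionDot, h, hmem]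
    | none =>
      have hnr : '.' ∉ rest := ih.mp h
      by_cases hc : c = '.' <;> simp [rpartitionDot, h, hc, hnr, eq_comm]

lemma dot_mem_of_rpartitionDot_some (t tl : List Char) (h : rpartitionDot t = some tl) :
    '.' ∈ t := by
  by_contra hn
  rw [← rpartitionDot_eq_none_iff] at hn
  simp [hn] at h

-- A's per-entry test, characterised: t ends with '.'++ks iff ks is exactly the text after t's last '.'
lemma endswith_dot_iff (t ks : List Char) (hks : '.' ∉ ks) :
    PySem.Chars.endswith t ('.' :: ks) = true ↔ rpartitionDot t = some ks := by
  rw [PySem.Chars.endswith_iff]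
  induction t with
  | nil => simp [rpartitionDot]
  | cons c rest ih =>
    rw [List.suffix_cons_iff]
    cases h : rpartitionDot rest with
    | some tail =>
      have hmem : '.' ∈ rest := dot_mem_of_rpartitionDot_some rest tail h
      have hne : ¬ ('.' :: ks = c :: rest) := by
        intro he
        exact hks (by rw [(List.cons.inj he).2]; exact hmem)
      rw [h] at ih
      simp [rpartitionDot, h, hne, ih]
    | none =>
      have hnr : '.' ∉ rest := (rpartitionDot_eq_none_iff rest).mp h
      have hnsuf : ¬ ('.' :: ks <:+ rest) := fun hs => hnr (hs.subset (by simp))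
      simp only [rpartitionDot, h]
      constructor
      · rintro (he | hs)
        · obtain ⟨h1, h2⟩ := List.cons.inj he
          simp [← h1, h2]
        · exact absurd hs hnsuf
      · intro hsome
        by_cases hc : c = '.'
        · simp [hc] at hsome
          left; rw [hc, hsome]
        · simp [hc] at hsome

-- B's string-equality tests, reduced to character lists
lemma ofList_eq (s ks : List Char) (k : String) (hk : k.toList = ks) :
    (String.ofList s = k) ↔ s = ks := by
  subst hk
  constructor
  · intro h; rw [← h]; simp
  · intro h; apply String.ext; simp [h]

-- the heart: A's scan over the map equals B's exact-suffix group scan, for any stripped/uppercased text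
set_option maxHeartbeats 1600000 in
lemma scan_eq_groups (t : List Char) :
    tickerScan t tickerCurrencyMap =
      (match rpartitionDot t with
       | none => "USD"
       | some tail => currencyScan (String.ofList tail) currencySuffixes) := by
  cases hr : rpartitionDot t with
  | none =>
    have hkey : ∀ ks : List Char, '.' ∉ ks → PySem.Chars.endswith t ('.' :: ks) = false := by
      intro ks hks
      rw [← Bool.not_eq_true, endswith_dot_iff t ks hks, hr]
      simp
    simp only [tickerScan, tickerCurrencyMap]
    rw [show PySem.Chars.upper (".NS" : String).toList = '.' :: ['N', 'S'] from by decide,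
        hkey ['N', 'S'] (by decide)]
    rw [show PySem.Chars.upper (".BO" : String).toList = '.' :: ['B', 'O'] from by decide,
        hkey ['B', 'O'] (by decide)]
    rw [show PySem.Chars.upper (".AE" : String).toList = '.' :: ['A', 'E'] from by decide,
        hkey ['A', 'E'] (by decide)]
    rw [show PySem.Chars.upper (".AD" : String).toList = '.' :: ['A', 'D'] from by decide,
        hkey ['A', 'D'] (by decide)]
    rw [show PySem.Chars.upper (".DU" : String).toList = '.' :: ['D', 'U'] from by decide,
        hkey ['D', 'U'] (by decide)]
    rw [show PySem.Chars.upper (".HK" : String).toList = '.' :: ['H', 'K'] from by decide,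
        hkey ['H', 'K'] (by decide)]
    rw [show PySem.Chars.upper (".SI" : String).toList = '.' :: ['S', 'I'] from by decide,
        hkey ['S', 'I'] (by decide)]
    rw [show PySem.Chars.upper (".L" : String).toList = '.' :: ['L'] from by decide,
        hkey ['L'] (by decide)]
    rw [show PySem.Chars.upper (".PA" : String).toList = '.' :: ['P', 'A'] from by decide,
        hkey ['P', 'A'] (by decide)]
    rw [show PySem.Chars.upper (".AS" : String).toList = '.' :: ['A', 'S'] from by decide,
        hkey ['A', 'S'] (by decide)]
    rw [show PySem.Chars.upper (".DE" : String).toList = '.' :: ['D', 'E'] from by decide,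
        hkey ['D', 'E'] (by decide)]
    rw [show PySem.Chars.upper (".MC" : String).toList = '.' :: ['M', 'C'] from by decide,
        hkey ['M', 'C'] (by decide)]
    rw [show PySem.Chars.upper (".MI" : String).toList = '.' :: ['M', 'I'] from by decide,
        hkey ['M', 'I'] (by decide)]
    rw [show PySem.Chars.upper (".AX" : String).toList = '.' :: ['A', 'X'] from by decide,
        hkey ['A', 'X'] (by decide)]
    rw [show PySem.Chars.upper (".TO" : String).toList = '.' :: ['T', 'O'] from by decide,
        hkey ['T', 'O'] (by decide)]
    rw [show PySem.Chars.upper (".SS" : String).toList = '.' :: ['S', 'S'] from by decide,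
        hkey ['S', 'S'] (by decide)]
    rw [show PySem.Chars.upper (".SZ" : String).toList = '.' :: ['S', 'Z'] from by decide,
        hkey ['S', 'Z'] (by decide)]
    rw [show PySem.Chars.upper (".T" : String).toList = '.' :: ['T'] from by decide,
        hkey ['T'] (by decide)]
    rw [show PySem.Chars.upper (".KS" : String).toList = '.' :: ['K', 'S'] from by decide,
        hkey ['K', 'S'] (by decide)]
    rw [show PySem.Chars.upper (".TW" : String).toList = '.' :: ['T', 'W'] from by decide,
        hkey ['T', 'W'] (by decide)]
    rw [show PySem.Chars.upper (".SA" : String).toList = '.' :: ['S', 'A'] from by decide,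
        hkey ['S', 'A'] (by decide)]
    rw [show PySem.Chars.upper (".JO" : String).toList = '.' :: ['J', 'O'] from by decide,
        hkey ['J', 'O'] (by decide)]
    rw [show PySem.Chars.upper (".SW" : String).toList = '.' :: ['S', 'W'] from by decide,
        hkey ['S', 'W'] (by decide)]
    rw [show PySem.Chars.upper (".TA" : String).toList = '.' :: ['T', 'A'] from by decide,
        hkey ['T', 'A'] (by decide)]
    rfl
  | some s =>
    have hkey : ∀ ks : List Char, '.' ∉ ks → PySem.Chars.endswith t ('.' :: ks) = (s == ks) := by
      intro ks hks
      have hiff := endswith_dot_iff t ks hks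
      rw [hr] at hiff
      by_cases he : s = ks
      · have ht : PySem.Chars.endswith t ('.' :: ks) = true := hiff.mpr (by rw [he])
        rw [ht, he]
        simp
      · have hf : PySem.Chars.endswith t ('.' :: ks) = false := by
          rw [← Bool.not_eq_true, hiff]
          simp only [Option.some.injEq]
          exact he
        rw [hf]
        simp [he]
    simp only [tickerScan, tickerCurrencyMap]
    rw [show PySem.Chars.upper (".NS" : String).toList = '.' :: ['N', 'S'] from by decide,
        hkey ['N', 'S'] (by decide)]
    rw [show PySem.Chars.upper (".BO" : String).toList = '.' :: ['B', 'O'] from by decide,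
        hkey ['B', 'O'] (by decide)]
    rw [show PySem.Chars.upper (".AE" : String).toList = '.' :: ['A', 'E'] from by decide,
        hkey ['A', 'E'] (by decide)]
    rw [show PySem.Chars.upper (".AD" : String).toList = '.' :: ['A', 'D'] from by decide,
        hkey ['A', 'D'] (by decide)]
    rw [show PySem.Chars.upper (".DU" : String).toList = '.' :: ['D', 'U'] from by decide,
        hkey ['D', 'U'] (by decide)]
    rw [show PySem.Chars.upper (".HK" : String).toList = '.' :: ['H', 'K'] from by decide,
        hkey ['H', 'K'] (by decide)]
    rw [show PySem.Chars.upper (".SI" : String).toList = '.' :: ['S', 'I'] from by decide,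
        hkey ['S', 'I'] (by decide)]
    rw [show PySem.Chars.upper (".L" : String).toList = '.' :: ['L'] from by decide,
        hkey ['L'] (by decide)]
    rw [show PySem.Chars.upper (".PA" : String).toList = '.' :: ['P', 'A'] from by decide,
        hkey ['P', 'A'] (by decide)]
    rw [show PySem.Chars.upper (".AS" : String).toList = '.' :: ['A', 'S'] from by decide,
        hkey ['A', 'S'] (by decide)]
    rw [show PySem.Chars.upper (".DE" : String).toList = '.' :: ['D', 'E'] from by decide,
        hkey ['D', 'E'] (by decide)]
    rw [show PySem.Chars.upper (".MC" : String).toList = '.' :: ['M', 'C'] from by decide,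
        hkey ['M', 'C'] (by decide)]
    rw [show PySem.Chars.upper (".MI" : String).toList = '.' :: ['M', 'I'] from by decide,
        hkey ['M', 'I'] (by decide)]
    rw [show PySem.Chars.upper (".AX" : String).toList = '.' :: ['A', 'X'] from by decide,
        hkey ['A', 'X'] (by decide)]
    rw [show PySem.Chars.upper (".TO" : String).toList = '.' :: ['T', 'O'] from by decide,
        hkey ['T', 'O'] (by decide)]
    rw [show PySem.Chars.upper (".SS" : String).toList = '.' :: ['S', 'S'] from by decide,
        hkey ['S', 'S'] (by decide)]
    rw [show PySem.Chars.upper (".SZ" : String).toList = '.' :: ['S', 'Z'] from by decide,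
        hkey ['S', 'Z'] (by decide)]
    rw [show PySem.Chars.upper (".T" : String).toList = '.' :: ['T'] from by decide,
        hkey ['T'] (by decide)]
    rw [show PySem.Chars.upper (".KS" : String).toList = '.' :: ['K', 'S'] from by decide,
        hkey ['K', 'S'] (by decide)]
    rw [show PySem.Chars.upper (".TW" : String).toList = '.' :: ['T', 'W'] from by decide,
        hkey ['T', 'W'] (by decide)]
    rw [show PySem.Chars.upper (".SA" : String).toList = '.' :: ['S', 'A'] from by decide,
        hkey ['S', 'A'] (by decide)]
    rw [show PySem.Chars.upper (".JO" : String).toList = '.' :: ['J', 'O'] from by decide,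
        hkey ['J', 'O'] (by decide)]
    rw [show PySem.Chars.upper (".SW" : String).toList = '.' :: ['S', 'W'] from by decide,
        hkey ['S', 'W'] (by decide)]
    rw [show PySem.Chars.upper (".TA" : String).toList = '.' :: ['T', 'A'] from by decide,
        hkey ['T', 'A'] (by decide)]
    simp only [beq_iff_eq, currencyScan, currencySuffixes, List.mem_cons,
      List.not_mem_nil, or_false,
      ofList_eq _ ['N', 'S'] "NS" (by decide),
      ofList_eq _ ['B', 'O'] "BO" (by decide),
      ofList_eq _ ['A', 'E'] "AE" (by decide),
      ofList_eq _ ['A', 'D'] "AD" (by decide),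
      ofList_eq _ ['D', 'U'] "DU" (by decide),
      ofList_eq _ ['H', 'K'] "HK" (by decide),
      ofList_eq _ ['S', 'I'] "SI" (by decide),
      ofList_eq _ ['L'] "L" (by decide),
      ofList_eq _ ['P', 'A'] "PA" (by decide),
      ofList_eq _ ['A', 'S'] "AS" (by decide),
      ofList_eq _ ['D', 'E'] "DE" (by decide),
      ofList_eq _ ['M', 'C'] "MC" (by decide),
      ofList_eq _ ['M', 'I'] "MI" (by decide),
      ofList_eq _ ['A', 'X'] "AX" (by decide),
      ofList_eq _ ['T', 'O'] "TO" (by decide),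
      ofList_eq _ ['S', 'S'] "SS" (by decide),
      ofList_eq _ ['S', 'Z'] "SZ" (by decide),
      ofList_eq _ ['T'] "T" (by decide),
      ofList_eq _ ['K', 'S'] "KS" (by decide),
      ofList_eq _ ['T', 'W'] "TW" (by decide),
      ofList_eq _ ['S', 'A'] "SA" (by decide),
      ofList_eq _ ['J', 'O'] "JO" (by decide),
      ofList_eq _ ['S', 'W'] "SW" (by decide),
      ofList_eq _ ['T', 'A'] "TA" (by decide)]
    by_cases h1 : s = ['N', 'S']
    · subst h1; decide
    by_cases h2 : s = ['B', 'O']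
    · subst h2; decide
    by_cases h3 : s = ['A', 'E']
    · subst h3; decide
    by_cases h4 : s = ['A', 'D']
    · subst h4; decide
    by_cases h5 : s = ['D', 'U']
    · subst h5; decide
    by_cases h6 : s = ['H', 'K']
    · subst h6; decide
    by_cases h7 : s = ['S', 'I']
    · subst h7; decide
    by_cases h8 : s = ['L']
    · subst h8; decide
    by_cases h9 : s = ['P', 'A']
    · subst h9; decide
    by_cases h10 : s = ['A', 'S']
    · subst h10; decide
    by_cases h11 : s = ['D', 'E']
    · subst h11; decide
    by_cases h12 : s = ['M', 'C']
    · subst h12; decide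
    by_cases h13 : s = ['M', 'I']
    · subst h13; decide
    by_cases h14 : s = ['A', 'X']
    · subst h14; decide
    by_cases h15 : s = ['T', 'O']
    · subst h15; decide
    by_cases h16 : s = ['S', 'S']
    · subst h16; decide
    by_cases h17 : s = ['S', 'Z']
    · subst h17; decide
    by_cases h18 : s = ['T']
    · subst h18; decide
    by_cases h19 : s = ['K', 'S']
    · subst h19; decide
    by_cases h20 : s = ['T', 'W']
    · subst h20; decide
    by_cases h21 : s = ['S', 'A']
    · subst h21; decide
    by_cases h22 : s = ['J', 'O']
    · subst h22; decide
    by_cases h23 : s = ['S', 'W']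
    · subst h23; decide
    by_cases h24 : s = ['T', 'A']
    · subst h24; decide
    simp [h1, h2, h3, h4, h5, h6, h7, h8, h9, h10, h11, h12, h13, h14, h15, h16, h17, h18, h19, h20, h21, h22, h23, h24]

-- ===== VERDICT (by name: the statement is the Claim_ definition above) =====
theorem detect_currency_from_ticker_spec : Claim_equal_detect_currency_from_ticker := by
  intro ticker _
  unfold Spec_detect_currency_from_ticker detect_currency_from_ticker detect_currency_from_ticker_alt
  by_cases h0 : ticker = ""
  · rw [h0, if_pos rfl, if_pos rfl]
  · rw [if_neg h0, if_neg h0]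
    exact scan_eq_groups _
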